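-- pv_equiv track=rewrite | github.com/DaChosens1/usaco | 2016/February/February 2017 Prob 2/2017_February_2_cowcross.py | follow_through
-- ===== SOURCE A (Python) =====
-- def follow_through(cows):
--     min_dist = 1000000000000
--     temp = cows[::]
--     for n in range(len(cows)):
--         dist = 0
--         hold = temp[0]
--         temp = temp[1::]
--         temp.append(hold)
--         for i in range(len(temp)):
--             dist += i * temp[i]
--         if dist < min_dist:
--             min_dist = dist
--     return min_dist
-- ===== SOURCE B (Python) =====
-- def follow_through(cows):
--     min_dist = 1000000000000
--     n = len(cows)
--     total = sum(cows)
--     s = sum(i * c for i, c in enumerate(cows))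
--     for c in cows:
--         s = s - total + n * c
--         min_dist = min(min_dist, s)
--     return min_dist
-- ===== Notes on version B (the rewrite author's own statement) =====
-- stated objective: faster
-- what changed: Replaces the rebuild-each-rotation-and-rescan double loop by a single pass that updates the weighted sum incrementally (S' = S - total + n*c) for each left-rotation.
import Mathlib
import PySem

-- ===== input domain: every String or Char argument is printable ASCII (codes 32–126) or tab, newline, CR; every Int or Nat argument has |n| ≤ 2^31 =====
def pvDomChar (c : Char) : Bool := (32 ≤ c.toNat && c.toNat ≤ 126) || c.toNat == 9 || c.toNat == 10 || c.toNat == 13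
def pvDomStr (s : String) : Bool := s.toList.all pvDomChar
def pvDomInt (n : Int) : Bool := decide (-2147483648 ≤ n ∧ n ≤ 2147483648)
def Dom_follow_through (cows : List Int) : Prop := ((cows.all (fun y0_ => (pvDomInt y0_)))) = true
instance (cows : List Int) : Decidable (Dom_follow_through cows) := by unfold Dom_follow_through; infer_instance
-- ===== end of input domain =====

-- ===== PORT A =====
-- one honest line: B replaces A's rebuild-and-rescan of every rotation by an incremental O(n) update of the weighted sum.
def follow_through (cows : List Int) : Int :=
  -- min_dist = 10**12; temp = cows[::]; for n in range(len(cows)): ...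
  (((PySem.List.pyRange 0 (cows.length : Int) 1).foldl
      (fun (st : Int × List Int) _ =>
        let temp := st.2
        -- hold = temp[0]: inside the loop temp is nonempty (same length as cows), so pyGetD is exact here
        let hold := PySem.List.pyGetD temp 0 0
        -- temp = temp[1:]; temp.append(hold)
        let temp := PySem.List.slice temp (some 1) none ++ [hold]
        -- dist = 0; for i in range(len(temp)): dist += i * temp[i]
        let dist := (PySem.List.pyRange 0 (temp.length : Int) 1).foldl
          (fun d i => d + i * PySem.List.pyGetD temp i 0) 0
        (if dist < st.1 then dist else st.1, temp))
      (1000000000000, cows))).1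

-- ===== PORT B =====
def follow_through_alt (cows : List Int) : Int :=
  let total := cows.foldl (· + ·) 0                 -- total = sum(cows)
  let n : Int := cows.length
  let s0 := (PySem.List.enumerate cows 0).foldl (fun a p => a + p.1 * p.2) 0  -- sum(i*c for i,c in enumerate(cows))
  (cows.foldl
      (fun (st : Int × Int) c =>
        let s := st.2 - total + n * c
        (min st.1 s, s))
      (1000000000000, s0)).1
-- ===== PRECONDITION & SPEC =====
def Spec_follow_through (cows : List Int) (out : Int) : Prop := out = follow_through_alt cows
instance (cows : List Int) (out : Int) : Decidable (Spec_follow_through cows out) := by unfold Spec_follow_through; infer_instance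

-- ===== CLAIM (what is proved, stated in full; the proofs are below) =====
def Claim_equal_follow_through : Prop := ∀ (cows : List Int), Dom_follow_through cows → Spec_follow_through cows (follow_through cows)


-- ===== LEMMAS AND PROOFS =====

-- mathematical weighted sum with starting index s: esum s [x0, x1, ...] = s*x0 + (s+1)*x1 + ...
def esum (s : Int) : List Int → Int
  | [] => 0
  | x :: t => s * x + esum (s + 1) t

def wsum (xs : List Int) : Int := esum 0 xs

lemma enumerate_foldl_esum (xs : List Int) (s c : Int) :
    (PySem.List.enumerate xs s).foldl (fun a p => a + p.1 * p.2) c = c + esum s xs := by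
  induction xs generalizing s c with
  | nil => simp [esum]
  | cons x t ih =>
      simp only [PySem.List.enumerate_cons, List.foldl_cons, esum, ih]
      ring

lemma esum_shift (t : List Int) (s : Int) : esum (s + 1) t = esum s t + t.sum := by
  induction t generalizing s with
  | nil => simp [esum]
  | cons x t ih => simp only [esum, ih, List.sum_cons]; ring

lemma esum_append_singleton (t : List Int) (y s : Int) :
    esum s (t ++ [y]) = esum s t + (s + t.length) * y := by
  induction t generalizing s with
  | nil => simp [esum]
  | cons x t ih =>
      simp only [List.cons_append, esum, ih, List.length_cons]
      push_cast; ring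

-- one left-rotation updates the weighted sum by  - sum + len * head
lemma wsum_rotate (y : Int) (t : List Int) :
    wsum (t ++ [y]) = wsum (y :: t) - (y :: t).sum + ((y :: t).length : Int) * y := by
  simp only [wsum, esum_append_singleton, esum, esum_shift, List.sum_cons, List.length_cons]
  push_cast; ring

-- A's inner loop computes wsum
lemma inner_eq_wsum (xs : List Int) :
    (PySem.List.pyRange 0 (xs.length : Int) 1).foldl
      (fun d i => d + i * PySem.List.pyGetD xs i 0) 0 = wsum xs := by
  have h : (PySem.List.enumerate xs 0).foldl (fun (a : Int) (p : Int × Int) => a + p.1 * p.2) 0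
      = (PySem.List.pyRange 0 (xs.length : Int) 1).foldl
          (fun d i => d + i * PySem.List.pyGetD xs i 0) 0 := by
    rw [PySem.List.enumerate_eq_map_pyRange (xs := xs) (d := 0), List.foldl_map]
    simp
  rw [← h, enumerate_foldl_esum, wsum]
  ring

def stepA : Int × List Int → Int → Int × List Int :=
  fun st _ =>
    let temp := st.2
    let hold := PySem.List.pyGetD temp 0 0
    let temp := PySem.List.slice temp (some 1) none ++ [hold]
    let dist := (PySem.List.pyRange 0 (temp.length : Int) 1).foldl
      (fun d i => d + i * PySem.List.pyGetD temp i 0) 0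
    (if dist < st.1 then dist else st.1, temp)

-- the joint loop invariant: A's temp is always a rotation  ys ++ zs  of cows = zs' form,
-- B's running s equals wsum of that rotation, and B still has ys to consume.
lemma loops_agree (ys : List Int) (zs : List Int) (total N m : Int) (l : List Int)
    (hl : l.length = ys.length)
    (htot : total = ys.sum + zs.sum) (hN : N = ((ys.length + zs.length : Nat) : Int)) :
    (l.foldl stepA (m, ys ++ zs)).1
      = (ys.foldl (fun (st : Int × Int) c =>
            let s := st.2 - total + N * c
            (min st.1 s, s)) (m, wsum (ys ++ zs))).1 := by
  induction ys generalizing zs m l with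
  | nil => cases l with
      | nil => simp
      | cons a l' => simp at hl
  | cons y ys ih =>
      cases l with
      | nil => simp at hl
      | cons a l' =>
        simp only [List.foldl_cons]
        have hstep : stepA (m, (y :: ys) ++ zs) a
            = (if wsum (ys ++ (zs ++ [y])) < m then wsum (ys ++ (zs ++ [y])) else m,
               ys ++ (zs ++ [y])) := by
          simp only [stepA, List.cons_append, PySem.List.pyGetD_zero_cons,
            PySem.List.slice_from_one, List.tail_cons, inner_eq_wsum, List.append_assoc]
        have hs : wsum ((y :: ys) ++ zs) - total + N * y = wsum (ys ++ (zs ++ [y])) := by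
          have := wsum_rotate y (ys ++ zs)
          simp only [List.cons_append] at this ⊢
          rw [← List.append_assoc, this, htot, hN]
          simp [List.sum_append]
          ring
        have hmin : min m (wsum (ys ++ (zs ++ [y])))
            = if wsum (ys ++ (zs ++ [y])) < m then wsum (ys ++ (zs ++ [y])) else m := by
          rcases lt_or_ge (wsum (ys ++ (zs ++ [y]))) m with h | h
          · simp [h, min_eq_right (le_of_lt h)]
          · simp [min_eq_left h, not_lt.mpr h]
        rw [hstep, hs, hmin]
        exact ih (zs ++ [y])
          (if wsum (ys ++ (zs ++ [y])) < m then wsum (ys ++ (zs ++ [y])) else m) l'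
          (by simpa using hl)
          (by simp [htot, List.sum_append]; ring)
          (by simp [hN]; ring)

-- ===== VERDICT (by name: the statement is the Claim_ definition above) =====
theorem follow_through_spec : Claim_equal_follow_through := by
  intro cows _
  unfold Spec_follow_through follow_through follow_through_alt
  have hl : (PySem.List.pyRange 0 (cows.length : Int) 1).length = cows.length := by
    simp [PySem.List.length_pyRange_one]
  have hsum : cows.foldl (· + ·) 0 = cows.sum := by
    simp [List.sum_eq_foldl]
  have hs0 : (PySem.List.enumerate cows 0).foldl (fun (a : Int) (p : Int × Int) => a + p.1 * p.2) 0
      = wsum cows := by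
    rw [enumerate_foldl_esum, wsum]; ring
  have h := loops_agree cows [] (cows.foldl (· + ·) 0) (cows.length : Int) 1000000000000
    (PySem.List.pyRange 0 (cows.length : Int) 1) hl (by simp [hsum]) (by simp)
  simp only [List.append_nil] at h
  show (List.foldl stepA (1000000000000, cows) (PySem.List.pyRange 0 (cows.length : Int) 1)).1
      = (cows.foldl (fun (st : Int × Int) c =>
            (min st.1 (st.2 - cows.foldl (· + ·) 0 + (cows.length : Int) * c),
             st.2 - cows.foldl (· + ·) 0 + (cows.length : Int) * c))
          (1000000000000,
            (PySem.List.enumerate cows 0).foldl (fun (a : Int) (p : Int × Int) => a + p.1 * p.2) 0)).1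
  rw [hs0]
  exact h
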